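-- pv_equiv track=rewrite | github.com/anthonypu463-coder/orphan-domains-v2 | scripts/01b_filter_pfam_interpro.py | pick_columns
-- ===== SOURCE A (Python) =====
-- def pick_columns(header):
--     """
--     Return (pf_key, ip_key). Try common UniProt TSV headers and fallbacks.
--     """
--     lh = [h.lower() for h in header]
--     # direct matches first
--     candidates = {
--         "pfam": ["xref_pfam", "cross-reference (pfam)", "pfam"],
--         "interpro": ["xref_interpro", "cross-reference (interpro)", "interpro"],
--     }
--     pf_key = next((h for h in header for pat in candidates["pfam"] if h.lower() == pat), None)
--     ip_key = next((h for h in header for pat in candidates["interpro"] if h.lower() == pat), None)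
--     # substring fallback
--     if pf_key is None:
--         for h in header:
--             if "pfam" in h.lower():
--                 pf_key = h; break
--     if ip_key is None:
--         for h in header:
--             if "interpro" in h.lower():
--                 ip_key = h; break
--     return pf_key, ip_key
-- ===== SOURCE B (Python) =====
-- def pick_columns(header):
--     """
--     Return (pf_key, ip_key). Single pass: track first exact and first
--     substring hit for each target, set-once, then prefer exact.
--     """
--     pf_pats = {"xref_pfam", "cross-reference (pfam)", "pfam"}
--     ip_pats = {"xref_interpro", "cross-reference (interpro)", "interpro"}
--     pf_exact = pf_sub = ip_exact = ip_sub = None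
--     for h in header:
--         l = h.lower()
--         if pf_exact is None and l in pf_pats:
--             pf_exact = h
--         if pf_sub is None and "pfam" in l:
--             pf_sub = h
--         if ip_exact is None and l in ip_pats:
--             ip_exact = h
--         if ip_sub is None and "interpro" in l:
--             ip_sub = h
--     return (pf_exact if pf_exact is not None else pf_sub,
--             ip_exact if ip_exact is not None else ip_sub)
-- ===== Notes on version B (the rewrite author's own statement) =====
-- stated objective: alternative
-- what changed: Replaces A's four sequential scans of the header (exact pfam, exact interpro, then two substring-fallback loops) with one single pass that maintains set-once first-hit slots for exact and substring matches of both targets, preferring the exact slot at the end.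
import Mathlib
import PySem

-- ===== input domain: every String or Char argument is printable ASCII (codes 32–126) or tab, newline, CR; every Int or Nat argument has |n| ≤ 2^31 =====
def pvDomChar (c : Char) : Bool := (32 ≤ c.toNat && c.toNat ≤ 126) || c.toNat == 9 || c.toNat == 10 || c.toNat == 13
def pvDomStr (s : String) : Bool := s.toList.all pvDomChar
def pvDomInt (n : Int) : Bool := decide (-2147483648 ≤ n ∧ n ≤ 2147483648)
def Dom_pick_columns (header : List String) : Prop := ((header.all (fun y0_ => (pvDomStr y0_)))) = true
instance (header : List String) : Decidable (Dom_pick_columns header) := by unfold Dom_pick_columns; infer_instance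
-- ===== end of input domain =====

-- B makes a single pass with set-once first-hit slots instead of A's four sequential scans; same cost class.

-- ===== PORT A =====
-- next((h for h in header for pat in pats if h.lower() == pat), None)
def pickExactA (pats : List String) : List String → Option String
  | [] => none
  | h :: t => if pats.any (fun pat => PySem.Str.lower h == pat) then some h else pickExactA pats t

-- the fallback loop: first h with sub in h.lower()
def pickSubA (sub : String) : List String → Option String
  | [] => none
  | h :: t => if PySem.Str.isIn sub (PySem.Str.lower h) then some h else pickSubA sub t

def pick_columns (header : List String) : Option String × Option String :=
  let pf0 := pickExactA ["xref_pfam", "cross-reference (pfam)", "pfam"] header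
  let ip0 := pickExactA ["xref_interpro", "cross-reference (interpro)", "interpro"] header
  let pf_key := match pf0 with
    | none => pickSubA "pfam" header
    | some h => some h
  let ip_key := match ip0 with
    | none => pickSubA "interpro" header
    | some h => some h
  (pf_key, ip_key)

-- ===== PORT B =====
-- one loop iteration of Source B: update the four set-once slots
def pickStepB (s : (Option String × Option String) × (Option String × Option String))
    (h : String) : (Option String × Option String) × (Option String × Option String) :=
  let l := PySem.Str.lower h
  let pfe := if s.1.1.isNone && (["xref_pfam", "cross-reference (pfam)", "pfam"].contains l) then some h else s.1.1
  let pfs := if s.1.2.isNone && PySem.Str.isIn "pfam" l then some h else s.1.2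
  let ipe := if s.2.1.isNone && (["xref_interpro", "cross-reference (interpro)", "interpro"].contains l) then some h else s.2.1
  let ips := if s.2.2.isNone && PySem.Str.isIn "interpro" l then some h else s.2.2
  ((pfe, pfs), (ipe, ips))

def pick_columns_alt (header : List String) : Option String × Option String :=
  let r := header.foldl pickStepB ((none, none), (none, none))
  ((match r.1.1 with | some h => some h | none => r.1.2),
   (match r.2.1 with | some h => some h | none => r.2.2))

-- ===== PRECONDITION & SPEC =====
def Spec_pick_columns (header : List String) (out : Option String × Option String) : Prop := out = pick_columns_alt header
instance (header : List String) (out : Option String × Option String) : Decidable (Spec_pick_columns header out) := by unfold Spec_pick_columns; infer_instance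

-- ===== CLAIM (what is proved, stated in full; the proofs are below) =====
def Claim_equal_pick_columns : Prop := ∀ (header : List String), Dom_pick_columns header → Spec_pick_columns header (pick_columns header)

-- ===== LEMMAS AND PROOFS =====

-- a single set-once slot, in isolation
def slot (p : String → Bool) (s : Option String) (l : List String) : Option String :=
  l.foldl (fun s h => if s.isNone && p h then some h else s) s

theorem slot_some (p : String → Bool) (x : String) (l : List String) :
    slot p (some x) l = some x := by
  induction l with
  | nil => rfl
  | cons h t ih => simpa [slot, List.foldl] using ih

-- the product fold is the product of the four independent slot folds
theorem foldl_pickStepB (l : List String)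
    (a b c d : Option String) :
    l.foldl pickStepB ((a, b), (c, d)) =
      ((slot (fun h => ["xref_pfam", "cross-reference (pfam)", "pfam"].contains (PySem.Str.lower h)) a l,
        slot (fun h => PySem.Str.isIn "pfam" (PySem.Str.lower h)) b l),
       (slot (fun h => ["xref_interpro", "cross-reference (interpro)", "interpro"].contains (PySem.Str.lower h)) c l,
        slot (fun h => PySem.Str.isIn "interpro" (PySem.Str.lower h)) d l)) := by
  induction l generalizing a b c d with
  | nil => rfl
  | cons h t ih => simp [List.foldl, slot, pickStepB, ih]

-- cons-step of a set-once slot started empty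
theorem slot_none_cons (p : String → Bool) (h : String) (t : List String) :
    slot p none (h :: t) = if p h then some h else slot p none t := by
  unfold slot
  simp only [List.foldl_cons, Option.isNone_none, Bool.true_and]
  by_cases hp : p h = true
  · rw [if_pos hp, if_pos hp]
    simpa [slot] using slot_some p h t
  · rw [if_neg hp, if_neg hp]

-- an empty exact slot computes A's exact scan
theorem slot_none_exact (pats : List String) (l : List String) :
    slot (fun h => pats.contains (PySem.Str.lower h)) none l = pickExactA pats l := by
  induction l with
  | nil => rfl
  | cons h t ih =>
    rw [slot_none_cons, pickExactA, List.contains_eq_any_beq, ih]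

-- an empty substring slot computes A's fallback scan
theorem slot_none_sub (sub : String) (l : List String) :
    slot (fun h => PySem.Str.isIn sub (PySem.Str.lower h)) none l = pickSubA sub l := by
  induction l with
  | nil => rfl
  | cons h t ih =>
    rw [slot_none_cons, pickSubA, ih]

-- "x if x is not None else y" matched in either arm order
theorem match_arm_comm (a b : Option String) :
    (match a with | none => b | some h => some h) =
      (match a with | some h => some h | none => b) := by
  cases a <;> rfl

-- ===== VERDICT (by name: the statement is the Claim_ definition above) =====
theorem pick_columns_spec : Claim_equal_pick_columns := by
  intro header _
  show pick_columns header = pick_columns_alt header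
  simp only [pick_columns, pick_columns_alt, foldl_pickStepB, slot_none_exact, slot_none_sub]
  rw [match_arm_comm, match_arm_comm]
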